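-- pv_equiv track=rewrite | github.com/xsot/google-code-golf-2025 | task327.py | expand_diagonals
-- ===== SOURCE A (Python) =====
-- def expand_diagonals(matrix_3x3: list[list[int]]) -> list[list[int]]:
--     """
--     Expands a 3x3 matrix to a 6x6 matrix by repeating its non-zero
--     digits diagonally towards the bottom-right.
--
--     Args:
--         matrix_3x3: A list of lists of digits representing a 3x3 matrix.
--                     The diagonals are guaranteed to have at most one
--                     non-zero digit.
--
--     Returns:
--         A new 6x6 matrix with the described diagonal expansion.
--     """
--     return [
--         [
--             # For each cell (r, c), find its source value by looking
--             # diagonally up and to the left into the 3x3 matrix.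
--             next(
--                 (
--                     matrix_3x3[r - k][c - k]
--                     # Iterate k to check cells (r-k, c-k) as potential sources.
--                     for k in range(min(r, c) + 1)
--                     # The source must be within the 3x3 grid and be non-zero.
--                     if r - k < 3 and c - k < 3 and matrix_3x3[r - k][c - k]
--                 ),
--                 0,  # If no non-zero source is found, the value is 0.
--             )
--             for c in range(6)
--         ]
--         for r in range(6)
--     ]
-- ===== SOURCE B (Python) =====
-- def expand_diagonals(matrix_3x3: list[list[int]]) -> list[list[int]]:
--     # Scatter instead of gather: pre-fill 6x6 with zeros, then for each
--     # non-zero source cell propagate its value down-right along its diagonal.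
--     # Iterating i ascending lets the nearest source above a cell win.
--     result = [[0] * 6 for _ in range(6)]
--     for i in range(3):
--         for j in range(3):
--             v = matrix_3x3[i][j]
--             if v:
--                 for d in range(6 - max(i, j)):
--                     result[i + d][j + d] = v
--     return result
-- ===== Notes on version B (the rewrite author's own statement) =====
-- stated objective: alternative
-- what changed: replaces A's per-output-cell gather (searching up-left along each diagonal with next()) by a scatter: zero-filled 6x6 grid into which each non-zero 3x3 source writes its diagonal, ascending row order making the nearest source win
import Mathlib
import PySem

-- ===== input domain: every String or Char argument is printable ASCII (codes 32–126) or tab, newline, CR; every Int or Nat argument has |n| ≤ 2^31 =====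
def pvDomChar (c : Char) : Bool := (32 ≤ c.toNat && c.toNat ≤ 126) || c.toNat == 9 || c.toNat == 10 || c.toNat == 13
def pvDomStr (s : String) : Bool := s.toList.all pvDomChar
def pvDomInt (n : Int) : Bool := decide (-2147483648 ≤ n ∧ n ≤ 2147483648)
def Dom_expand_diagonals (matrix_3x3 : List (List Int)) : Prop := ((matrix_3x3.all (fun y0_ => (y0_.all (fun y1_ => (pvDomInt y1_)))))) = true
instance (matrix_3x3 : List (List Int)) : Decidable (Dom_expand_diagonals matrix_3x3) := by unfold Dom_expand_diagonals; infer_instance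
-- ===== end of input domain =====

-- B replaces A's per-cell diagonal gather (search up-left for the nearest non-zero source)
-- by a scatter: a zero-filled 6x6 grid into which each non-zero 3x3 source writes its
-- down-right diagonal, ascending row order making the nearest source win. Equal return
-- value on every input A accepts (B mutates only its own fresh grid; A mutates nothing).


-- ===== PORT A =====
-- matrix_3x3[i][j]: Python raises IndexError out of range; the `.getD` defaults are
-- reached only outside Pre_expand_diagonals (which guarantees a 3x3 prefix), so aGet
-- is exact on every admitted input.
def aGet (m : List (List Int)) (i j : Int) : Int :=
  (PySem.List.pyGet? ((PySem.List.pyGet? m i).getD []) j).getD 0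

-- next((matrix[r-k][c-k] for k in range(min(r,c)+1) if r-k<3 and c-k<3 and matrix[r-k][c-k]), 0)
-- is ported as: filter the range by the guard, map to the value, take the head or the default.
def expand_diagonals (matrix_3x3 : List (List Int)) : List (List Int) :=
  (PySem.List.pyRange 0 6 1).map (fun r =>
    (PySem.List.pyRange 0 6 1).map (fun c =>
      (((PySem.List.pyRange 0 (min r c + 1) 1).filter
          (fun k => decide (r - k < 3) && decide (c - k < 3) &&
                    (aGet matrix_3x3 (r - k) (c - k) != 0))).map
        (fun k => aGet matrix_3x3 (r - k) (c - k))).headD 0))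

-- ===== PORT B =====
-- matrix_3x3[i][j] with Nat indices 0..2 (defaults reached only outside Pre_).
def bGet (m : List (List Int)) (i j : Nat) : Int := (m.getD i []).getD j 0

-- result[i][j] = v
def bSet (g : List (List Int)) (i j : Nat) (v : Int) : List (List Int) :=
  g.modify i (fun row => row.set j v)

def expand_diagonals_alt (matrix_3x3 : List (List Int)) : List (List Int) :=
  (List.range 3).foldl (fun g i =>
    (List.range 3).foldl (fun g j =>
      let v := bGet matrix_3x3 i j
      if v ≠ 0 then
        (List.range (6 - max i j)).foldl (fun g d => bSet g (i + d) (j + d) v) g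
      else g) g)
    (List.replicate 6 (List.replicate 6 (0 : Int)))

-- ===== PRECONDITION & SPEC =====
-- Pre_ excludes exactly the inputs on which the Python A raises IndexError:
-- fewer than 3 rows, or one of the first three rows shorter than 3 entries.
def Pre_expand_diagonals (matrix_3x3 : List (List Int)) : Prop :=
  3 ≤ matrix_3x3.length ∧
  3 ≤ (matrix_3x3.getD 0 []).length ∧
  3 ≤ (matrix_3x3.getD 1 []).length ∧
  3 ≤ (matrix_3x3.getD 2 []).length
instance (matrix_3x3 : List (List Int)) : Decidable (Pre_expand_diagonals matrix_3x3) := by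
  unfold Pre_expand_diagonals; infer_instance

def pvWitness_expand_diagonals : List (List Int) := [[1, 0, 0], [0, 2, 0], [0, 0, 0]]

def Spec_expand_diagonals (matrix_3x3 : List (List Int)) (out : List (List Int)) : Prop := out = expand_diagonals_alt matrix_3x3
instance (matrix_3x3 : List (List Int)) (out : List (List Int)) : Decidable (Spec_expand_diagonals matrix_3x3 out) := by unfold Spec_expand_diagonals; infer_instance

-- ===== CLAIM (what is proved, stated in full; the proofs are below) =====
def Claim_equal_expand_diagonals : Prop := ∀ (matrix_3x3 : List (List Int)), Dom_expand_diagonals matrix_3x3 → Pre_expand_diagonals matrix_3x3 → Spec_expand_diagonals matrix_3x3 (expand_diagonals matrix_3x3)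

-- ===== LEMMAS AND PROOFS =====
theorem ite_cons {α : Type} (P : Prop) [Decidable P] (x y : α) (xs ys : List α) :
    (if P then x::xs else y::ys) = (if P then x else y) :: (if P then xs else ys) := by
  split <;> rfl

theorem headD_map_filter_cons {α : Type} (p : α → Bool) (f : α → Int) (d : Int) (k : α) (ks : List α) :
    (List.map f (List.filter p (k :: ks))).headD d
      = if p k then f k else (List.map f (List.filter p ks)).headD d := by
  by_cases h : p k <;> simp [h]

set_option maxHeartbeats 4000000 in
set_option maxRecDepth 20000 in
theorem key (a b c d e f g h i : Int)
    (t0 t1 t2 : List Int) (rest : List (List Int)) :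
    expand_diagonals ((a::b::c::t0)::(d::e::f::t1)::(g::h::i::t2)::rest)
      = expand_diagonals_alt ((a::b::c::t0)::(d::e::f::t1)::(g::h::i::t2)::rest) := by
  have hR1 : PySem.List.pyRange 0 1 1 = [0] := by decide
  have hR2 : PySem.List.pyRange 0 2 1 = [0,1] := by decide
  have hR3 : PySem.List.pyRange 0 3 1 = [0,1,2] := by decide
  have hR4 : PySem.List.pyRange 0 4 1 = [0,1,2,3] := by decide
  have hR5 : PySem.List.pyRange 0 5 1 = [0,1,2,3,4] := by decide
  have hR6 : PySem.List.pyRange 0 6 1 = [0,1,2,3,4,5] := by decide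
  have h00 : aGet ((a::b::c::t0)::(d::e::f::t1)::(g::h::i::t2)::rest) 0 0 = a := by simp [aGet, pysem]
  have h01 : aGet ((a::b::c::t0)::(d::e::f::t1)::(g::h::i::t2)::rest) 0 1 = b := by simp [aGet, pysem]
  have h02 : aGet ((a::b::c::t0)::(d::e::f::t1)::(g::h::i::t2)::rest) 0 2 = c := by simp [aGet, pysem]
  have h10 : aGet ((a::b::c::t0)::(d::e::f::t1)::(g::h::i::t2)::rest) 1 0 = d := by simp [aGet, pysem]
  have h11 : aGet ((a::b::c::t0)::(d::e::f::t1)::(g::h::i::t2)::rest) 1 1 = e := by simp [aGet, pysem]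
  have h12 : aGet ((a::b::c::t0)::(d::e::f::t1)::(g::h::i::t2)::rest) 1 2 = f := by simp [aGet, pysem]
  have h20 : aGet ((a::b::c::t0)::(d::e::f::t1)::(g::h::i::t2)::rest) 2 0 = g := by simp [aGet, pysem]
  have h21 : aGet ((a::b::c::t0)::(d::e::f::t1)::(g::h::i::t2)::rest) 2 1 = h := by simp [aGet, pysem]
  have h22 : aGet ((a::b::c::t0)::(d::e::f::t1)::(g::h::i::t2)::rest) 2 2 = i := by simp [aGet, pysem]
  norm_num [expand_diagonals_alt, bGet, bSet, List.range_succ, List.replicate, ite_cons, ite_self]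
  norm_num only [expand_diagonals, min_def, if_true, if_false, hR1, hR2, hR3, hR4, hR5, hR6,
    List.map_cons, List.map_nil,
    headD_map_filter_cons, List.filter_nil, List.headD_nil, true_and, and_true, false_and, and_false,
    h00, h01, h02, h10, h11, h12, h20, h21, h22, Bool.and_eq_true, decide_eq_true_eq, bne_iff_ne]
  clear hR1 hR2 hR3 hR4 hR5 hR6 h00 h01 h02 h10 h11 h12 h20 h21 h22
  simp only [List.cons.injEq]
  and_intros <;> first | trivial | (split_ifs <;> omega)

-- ===== VERDICT (by name: the statement is the Claim_ definition above) =====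
theorem expand_diagonals_spec : Claim_equal_expand_diagonals := by
  intro m _ hPre
  obtain ⟨h0, h1, h2, h3⟩ := hPre
  match m, h0 with
  | r0 :: r1 :: r2 :: rest, _ =>
    simp only [List.getD, List.getElem?_cons_zero, List.getElem?_cons_succ, Option.getD_some] at h1 h2 h3
    match r0, h1 with
    | a::b::c::t0, _ =>
    match r1, h2 with
    | d::e::f::t1, _ =>
    match r2, h3 with
    | g::h::i::t2, _ =>
      exact key a b c d e f g h i t0 t1 t2 rest
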